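-- pv_equiv track=rewrite | github.com/KrishnaAggarwal2003/Cellular_Automatons | 1-d.py | eight_bit_binary
-- ===== SOURCE A (Python) =====
-- def eight_bit_binary(num):
--   binary = []
--   x = len(binary)
--
--   while x<8:
--     binary.append(num%2)
--     num = num//2
--     x+=1
--   binary.reverse()
--
--   cell_combinations = ['111','110','101','100','011','010','001','000']
--   rule_dict = dict(zip(cell_combinations , binary))
--
--   return rule_dict
-- ===== SOURCE B (Python) =====
-- def eight_bit_binary(num):
--   cell_combinations = ['111','110','101','100','011','010','001','000']
--   return {k: (num // (2 ** (7 - i))) % 2 for i, k in enumerate(cell_combinations)}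
-- ===== Notes on version B (the rewrite author's own statement) =====
-- stated objective: simpler
-- what changed: Replaces the mutable-list while loop (extract low bit, halve, reverse, zip into a dict) with a single dict comprehension that computes each bit independently from its key's position by floor division by the matching power of two and remainder.
import Mathlib
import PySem

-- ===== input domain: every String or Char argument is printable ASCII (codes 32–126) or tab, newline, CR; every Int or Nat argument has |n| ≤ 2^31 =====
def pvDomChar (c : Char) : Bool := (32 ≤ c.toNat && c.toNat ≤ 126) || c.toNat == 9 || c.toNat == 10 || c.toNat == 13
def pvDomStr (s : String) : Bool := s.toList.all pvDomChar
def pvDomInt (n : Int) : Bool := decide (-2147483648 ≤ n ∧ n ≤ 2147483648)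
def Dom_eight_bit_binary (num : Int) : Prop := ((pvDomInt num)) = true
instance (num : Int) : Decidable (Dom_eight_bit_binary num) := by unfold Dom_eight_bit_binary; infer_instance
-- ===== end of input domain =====

-- B replaces A's LSB-extraction while-loop + reverse by a comprehension that computes each
-- bit independently from its key's position by floor division and remainder; objective: simpler.

-- ===== PORT A =====
-- the while loop: append num % 2, halve num, until x = 8
def pvALoop (binary : List Int) (num : Int) (x : Nat) : List Int :=
  if x < 8 then
    pvALoop (binary ++ [PySem.Int.mod num 2]) (PySem.Int.floordiv num 2) (x + 1)
  else binary
  termination_by 8 - x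

def eight_bit_binary (num : Int) : List (String × Int) :=
  let binary := pvALoop [] num 0
  let binary := binary.reverse
  let cell_combinations : List String := ["111","110","101","100","011","010","001","000"]
  (PySem.Dict.ofList (cell_combinations.zip binary)).items

-- ===== PORT B =====
def eight_bit_binary_alt (num : Int) : List (String × Int) :=
  let cell_combinations : List String := ["111","110","101","100","011","010","001","000"]
  (PySem.List.enumerate cell_combinations).map
    (fun ik => (ik.2, PySem.Int.mod (PySem.Int.floordiv num ((2:Int) ^ (7 - ik.1).toNat)) 2))

-- ===== PRECONDITION & SPEC =====
def Spec_eight_bit_binary (num : Int) (out : List (String × Int)) : Prop := out = eight_bit_binary_alt num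
instance (num : Int) (out : List (String × Int)) : Decidable (Spec_eight_bit_binary num out) := by unfold Spec_eight_bit_binary; infer_instance

-- ===== CLAIM (what is proved, stated in full; the proofs are below) =====
def Claim_equal_eight_bit_binary : Prop := ∀ (num : Int), Dom_eight_bit_binary num → Spec_eight_bit_binary num (eight_bit_binary num)

-- ===== LEMMAS AND PROOFS =====
theorem pvALoop_step (b : List Int) (num : Int) (x : Nat) (h : x < 8) :
    pvALoop b num x = pvALoop (b ++ [PySem.Int.mod num 2]) (PySem.Int.floordiv num 2) (x + 1) := by
  rw [pvALoop]; simp [h]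

theorem pvALoop_stop (b : List Int) (num : Int) (x : Nat) (h : ¬ x < 8) :
    pvALoop b num x = b := by
  rw [pvALoop]; simp [h]

-- ===== VERDICT (by name: the statement is the Claim_ definition above) =====
set_option maxRecDepth 10000 in
theorem eight_bit_binary_spec : Claim_equal_eight_bit_binary := by
  intro num _
  unfold Spec_eight_bit_binary eight_bit_binary eight_bit_binary_alt
  rw [pvALoop_step _ _ _ (by norm_num), pvALoop_step _ _ _ (by norm_num),
      pvALoop_step _ _ _ (by norm_num), pvALoop_step _ _ _ (by norm_num),
      pvALoop_step _ _ _ (by norm_num), pvALoop_step _ _ _ (by norm_num),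
      pvALoop_step _ _ _ (by norm_num), pvALoop_step _ _ _ (by norm_num),
      pvALoop_stop _ _ _ (by norm_num)]
  dsimp only
  simp only [List.nil_append, List.cons_append, List.reverse_cons, List.reverse_nil, List.zip]
  simp [PySem.Dict.ofList, PySem.Dict.update, PySem.Dict.empty, PySem.Dict.insert]
  omega
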